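-- pv_equiv track=rewrite | github.com/jIab-b/mlsys | modal/format.py | _reorder_spec
-- ===== SOURCE A (Python) =====
-- def _reorder_spec(spec: str) -> str:
--     parts = [p.strip() for p in spec.split(";") if p.strip()]
--     kv = {}
--     for part in parts:
--         key, sep, value = part.partition(":")
--         if sep:
--             kv[key.strip()] = value.strip()
--     if not kv:
--         return spec.strip()
--     order = ["batch", "num_pages", "seq_len", "seed"]
--     ordered = [f"{k}: {kv[k]}" for k in order if k in kv]
--     for k in sorted(k for k in kv if k not in order):
--         ordered.append(f"{k}: {kv[k]}")
--     return "; ".join(ordered)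
-- ===== SOURCE B (Python) =====
-- def _reorder_spec(spec: str) -> str:
--     order = ["batch", "num_pages", "seq_len", "seed"]
--     kv = {}
--     for part in reversed(spec.split(";")):
--         key, sep, value = part.strip().partition(":")
--         if sep:
--             kv.setdefault(key.strip(), value.strip())
--     if not kv:
--         return spec.strip()
--     keys = sorted(kv, key=lambda k: (order.index(k) if k in order else len(order), k))
--     return "; ".join("%s: %s" % (k, kv[k]) for k in keys)
-- ===== Notes on version B (the rewrite author's own statement) =====
-- stated objective: alternative
-- what changed: A builds the dict forward (last write wins) and emits in two passes (priority loop, then sorted extras); B scans the raw split parts in reverse once with dict.setdefault (first-seen wins, skipping A's pre-strip/filter pass) and emits with a single sorted() call under a composite (priority index, key) rank.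
import Mathlib
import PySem

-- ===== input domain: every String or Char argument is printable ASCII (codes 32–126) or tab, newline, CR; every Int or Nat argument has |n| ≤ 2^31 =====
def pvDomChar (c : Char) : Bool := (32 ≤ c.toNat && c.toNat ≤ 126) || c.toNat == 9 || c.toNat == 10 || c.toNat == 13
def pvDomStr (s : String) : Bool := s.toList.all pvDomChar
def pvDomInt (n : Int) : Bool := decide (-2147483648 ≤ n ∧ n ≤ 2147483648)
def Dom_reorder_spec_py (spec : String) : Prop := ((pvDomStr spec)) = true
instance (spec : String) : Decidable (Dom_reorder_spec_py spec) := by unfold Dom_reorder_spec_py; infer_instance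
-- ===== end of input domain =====

-- B builds the dedup dict by ONE reverse scan of the raw ';'-split parts with setdefault
-- (first-seen wins = A's last-write-wins; no pre-strip/filter pass) and emits with ONE
-- sorted() call under the composite key (priority index | len(order), key); objective: alternative.

-- ===== PORT A =====
-- Python's part.partition(":") is ported by hand (exact): find the first ':' (PySem.Str.find,
-- leftmost or -1); sep is empty iff find = -1, head = part[:i], tail = part[i+1:].
def reorder_spec_py (spec : String) : String :=
  -- spec.split(";") : sep ≠ "" so split? is always `some`; the .getD [] is never taken
  let parts := (((PySem.Str.split? spec ";").getD []).map PySem.Str.strip).filter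
      (fun p => p ≠ "")
  let kv : PySem.Dict String String := parts.foldl (fun d part =>
      let i := PySem.Str.find part ":"
      if i = -1 then d
      else d.insert (PySem.Str.strip (PySem.Str.slice part none (some i)))
                    (PySem.Str.strip (PySem.Str.slice part (some (i + 1)) none)))
    PySem.Dict.empty
  if kv.keys = [] then PySem.Str.strip spec
  else
    let order : List String := ["batch", "num_pages", "seq_len", "seed"]
    -- kv[k] with k ∈ kv: getD never takes its default here
    let ordered := (order.filter (fun k => kv.contains k)).map
        (fun k => k ++ ": " ++ kv.getD k "")
    let extras := PySem.List.sorted (kv.keys.filter (fun k => decide (k ∉ order)))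
        (fun k => k) false
    let ordered := extras.foldl (fun acc k => acc ++ [k ++ ": " ++ kv.getD k ""]) ordered
    PySem.Str.join "; " ordered

-- ===== PORT B =====
-- reversed(spec.split(";")) → List.reverse; kv.setdefault → PySem.Dict.setdefault;
-- order.index(k) is guarded by `k in order`, so index?.getD 0 never takes its default.
def reorder_spec_py_alt (spec : String) : String :=
  let order : List String := ["batch", "num_pages", "seq_len", "seed"]
  let kv : PySem.Dict String String :=
    (((PySem.Str.split? spec ";").getD []).reverse).foldl (fun d part =>
        let p := PySem.Str.strip part
        let i := PySem.Str.find p ":"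
        if i = -1 then d
        else d.setdefault (PySem.Str.strip (PySem.Str.slice p none (some i)))
                          (PySem.Str.strip (PySem.Str.slice p (some (i + 1)) none)))
      PySem.Dict.empty
  if kv.keys = [] then PySem.Str.strip spec
  else
    let keys := PySem.List.sorted2 kv.keys
        (fun k => if decide (k ∈ order) then (((PySem.List.index? order k).getD 0 : Nat) : Int)
                  else (order.length : Int))
        (fun k => k) false
    PySem.Str.join "; " (keys.map (fun k => k ++ ": " ++ kv.getD k ""))

-- ===== PRECONDITION & SPEC =====
def Spec_reorder_spec_py (spec : String) (out : String) : Prop := out = reorder_spec_py_alt spec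
instance (spec : String) (out : String) : Decidable (Spec_reorder_spec_py spec out) := by unfold Spec_reorder_spec_py; infer_instance

-- ===== CLAIM (what is proved, stated in full; the proofs are below) =====
def Claim_equal_reorder_spec_py : Prop := ∀ (spec : String), Dom_reorder_spec_py spec → Spec_reorder_spec_py spec (reorder_spec_py spec)

-- ===== LEMMAS AND PROOFS =====

-- the key/value extraction both loops perform on an (already stripped) part
def pvParse (part : String) : Option (String × String) :=
  let i := PySem.Str.find part ":"
  if i = -1 then none
  else some (PySem.Str.strip (PySem.Str.slice part none (some i)),
             PySem.Str.strip (PySem.Str.slice part (some (i + 1)) none))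

-- A's fold over parts = a fold over the extracted (key, value) pairs
lemma pv_foldA (l : List String) (d : PySem.Dict String String) :
    l.foldl (fun d part =>
        let i := PySem.Str.find part ":"
        if i = -1 then d
        else d.insert (PySem.Str.strip (PySem.Str.slice part none (some i)))
                      (PySem.Str.strip (PySem.Str.slice part (some (i + 1)) none))) d
      = (l.filterMap pvParse).foldl (fun d p => d.insert p.1 p.2) d := by
  induction l generalizing d with
  | nil => rfl
  | cons a l ih =>
    simp only [List.foldl_cons, List.filterMap_cons, pvParse]
    by_cases h : PySem.Str.find a ":" = -1
    · simp only [if_pos h]; exact ih d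
    · simp only [if_neg h, List.foldl_cons]; exact ih _

-- B's fold overised raw parts = a fold over the pairs extracted after stripping
lemma pv_foldB (l : List String) (d : PySem.Dict String String) :
    l.foldl (fun d part =>
        let p := PySem.Str.strip part
        let i := PySem.Str.find p ":"
        if i = -1 then d
        else d.setdefault (PySem.Str.strip (PySem.Str.slice p none (some i)))
                          (PySem.Str.strip (PySem.Str.slice p (some (i + 1)) none))) d
      = (l.filterMap (fun p => pvParse (PySem.Str.strip p))).foldl
          (fun d p => d.setdefault p.1 p.2) d := by
  induction l generalizing d with
  | nil => rfl
  | cons a l ih =>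
    simp only [List.foldl_cons, List.filterMap_cons, pvParse]
    by_cases h : PySem.Str.find (PySem.Str.strip a) ":" = -1
    · simp only [if_pos h]; exact ih d
    · simp only [if_neg h, List.foldl_cons]; exact ih _

-- A's pre-pass (strip each part, drop empties) extracts the same pairs: pvParse "" = none
lemma pv_pairs_eq (l : List String) :
    ((l.map PySem.Str.strip).filter (fun p => p ≠ "")).filterMap pvParse
      = l.filterMap (fun p => pvParse (PySem.Str.strip p)) := by
  induction l with
  | nil => simp only [List.map_nil, List.filter_nil, List.filterMap_nil]
  | cons a l ih =>
    simp only [List.map_cons, List.filter_cons]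
    by_cases h : PySem.Str.strip a = ""
    · simp only [h, List.filterMap_cons]
      rw [if_neg (by simp)]
      rw [show pvParse "" = none from rfl]
      exact ih
    · rw [if_pos (by simpa using h)]
      rw [List.filterMap_cons, List.filterMap_cons, ih]

-- first-match lookup distributes over append
lemma pv_lookup_append (l t : List (String × String)) (k : String) :
    (l ++ t).lookup k = ((l.lookup k).or (t.lookup k)) := by
  induction l with
  | nil => simp [List.lookup]
  | cons p l ih =>
    simp only [List.cons_append, List.lookup]
    cases h : k == p.1 <;> simp [ih]

-- insert-fold (last write wins): lookup = first match in the REVERSED pair list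
lemma pv_insert_fold_get? (ps : List (String × String)) (d : PySem.Dict String String)
    (k : String) :
    (ps.foldl (fun d p => d.insert p.1 p.2) d).get? k = ((ps.reverse.lookup k).or (d.get? k)) := by
  induction ps generalizing d with
  | nil => simp
  | cons p ps ih =>
    simp only [List.foldl_cons, List.reverse_cons, ih, pv_lookup_append, Option.or_assoc]
    congr 1
    by_cases h : k = p.1
    · subst h; simp [List.lookup, PySem.Dict.get?_insert_self]
    · rw [PySem.Dict.get?_insert_of_ne d p.2 h]
      simp [List.lookup, beq_eq_false_iff_ne.mpr h]

-- setdefault-fold (first write wins): lookup = first match in the pair list itself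
lemma pv_setdefault_fold_get? (ps : List (String × String)) (d : PySem.Dict String String)
    (k : String) :
    (ps.foldl (fun d p => d.setdefault p.1 p.2) d).get? k = ((d.get? k).or (ps.lookup k)) := by
  induction ps generalizing d with
  | nil => simp [List.lookup]
  | cons p ps ih =>
    simp only [List.foldl_cons, ih]
    by_cases h : k = p.1
    · subst h
      rw [PySem.Dict.get?_setdefault_self]
      cases d.get? p.1 <;> simp [List.lookup]
    · rw [PySem.Dict.get?_setdefault_of_ne d p.2 h]
      simp [List.lookup, beq_eq_false_iff_ne.mpr h]

-- both folds keep the key list duplicate-free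
lemma pv_nodup_insert_fold (ps : List (String × String)) (d : PySem.Dict String String)
    (h : d.keys.Nodup) : (ps.foldl (fun d p => d.insert p.1 p.2) d).keys.Nodup := by
  induction ps generalizing d with
  | nil => exact h
  | cons p ps ih => exact ih _ (PySem.Dict.nodup_keys_insert d _ _ h)

lemma pv_nodup_setdefault_fold (ps : List (String × String)) (d : PySem.Dict String String)
    (h : d.keys.Nodup) : (ps.foldl (fun d p => d.setdefault p.1 p.2) d).keys.Nodup := by
  induction ps generalizing d with
  | nil => exact h
  | cons p ps ih =>
    simp only [List.foldl_cons]
    refine ih _ ?_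
    show (d.setdefault p.1 p.2).keys.Nodup
    by_cases hc : d.contains p.1
    · rwa [PySem.Dict.setdefault_of_contains d p.2 hc]
    · rw [PySem.Dict.setdefault_of_not_contains d p.2 (by simpa using hc)]
      exact PySem.Dict.nodup_keys_insert d _ _ h

-- B's composite rank key, written out
def pvRankD (k : String) : Int :=
  if k = "batch" then 0 else if k = "num_pages" then 1 else
  if k = "seq_len" then 2 else if k = "seed" then 3 else 4

lemma pv_rankB_eq (k : String) :
    (if decide (k ∈ (["batch", "num_pages", "seq_len", "seed"] : List String))
       then (((PySem.List.index? (["batch", "num_pages", "seq_len", "seed"] : List String) k).getD 0 : Nat) : Int)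
       else ((["batch", "num_pages", "seq_len", "seed"] : List String).length : Int))
      = pvRankD k := by
  by_cases h : k ∈ (["batch", "num_pages", "seq_len", "seed"] : List String)
  · rw [if_pos (by simpa using h)]
    fin_cases h <;> decide
  · rw [if_neg (by simpa using h)]
    simp only [List.mem_cons, not_or] at h
    simp [pvRankD, h.1, h.2.1, h.2.2.1, h.2.2.2.1]

-- sorted2 is sorted under the lexicographic pair key
lemma pv_sorted2_eq_sorted_lex {α : Type} (xs : List α) (k1 : α → Int) (k2 : α → String) :
    PySem.List.sorted2 xs k1 k2 false
      = PySem.List.sorted xs (fun x => toLex (k1 x, k2 x)) false := by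
  simp only [PySem.List.sorted2, PySem.List.sorted, if_neg (Bool.false_ne_true)]
  have hb : (fun a b => decide (k1 a < k1 b) || (!decide (k1 b < k1 a) && decide (k2 a < k2 b)))
      = (fun a b : α => decide (toLex (k1 a, k2 a) < toLex (k1 b, k2 b))) := by
    funext a b
    rcases lt_trichotomy (k1 a) (k1 b) with h | h | h
    · simp [h, Prod.Lex.toLex_lt_toLex, not_lt_of_gt h]
    · simp [h, Prod.Lex.toLex_lt_toLex]
    · simp [h, Prod.Lex.toLex_lt_toLex, not_lt_of_gt h, ne_of_gt h]
  rw [hb]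

-- the composite-rank sort of a duplicate-free key list = priority keys first, then sorted extras
lemma pv_sorted2_rank (ks : List String) (hnd : ks.Nodup) :
    PySem.List.sorted2 ks (fun k => pvRankD k) (fun k => k) false
      = (["batch", "num_pages", "seq_len", "seed"] : List String).filter
          (fun o => decide (o ∈ ks))
        ++ PySem.List.sorted
            (ks.filter (fun k => decide (k ∉ (["batch", "num_pages", "seq_len", "seed"] : List String))))
            (fun k => k) false := by
  rw [pv_sorted2_eq_sorted_lex]
  have h2 : (PySem.List.sorted
      (ks.filter (fun k => decide (k ∉ (["batch", "num_pages", "seq_len", "seed"] : List String))))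
      (fun k => k) false).Perm
      (ks.filter (fun k => decide (k ∉ (["batch", "num_pages", "seq_len", "seed"] : List String)))) :=
    PySem.List.sorted_perm _ _ _
  have h4 : ∀ k ∈ PySem.List.sorted
      (ks.filter (fun k => decide (k ∉ (["batch", "num_pages", "seq_len", "seed"] : List String))))
      (fun k => k) false, pvRankD k = 4 := by
    intro k hk
    have hmem : k ∈ ks.filter
        (fun k => decide (k ∉ (["batch", "num_pages", "seq_len", "seed"] : List String))) :=
      (PySem.List.mem_sorted _ _ _ _).mp hk
    have hkno : k ∉ (["batch", "num_pages", "seq_len", "seed"] : List String) := by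
      simpa using (List.mem_filter.mp hmem).2
    simp only [List.mem_cons, not_or] at hkno
    simp [pvRankD, hkno.1, hkno.2.1, hkno.2.2.1, hkno.2.2.2.1]
  apply PySem.List.sorted_eq_of_perm_of_pairwise_lt
  · -- permutation with ks
    have h1 : ((["batch", "num_pages", "seq_len", "seed"] : List String).filter
        (fun o => decide (o ∈ ks))).Perm
        (ks.filter (fun k => decide (k ∈ (["batch", "num_pages", "seq_len", "seed"] : List String)))) := by
      rw [List.perm_ext_iff_of_nodup (List.Nodup.filter _ (by decide))
        (List.Nodup.filter _ hnd)]
      intro a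
      simp only [List.mem_filter, decide_eq_true_eq]
      tauto
    refine (h1.append h2).trans ?_
    have := List.filter_append_perm
      (fun k => decide (k ∈ (["batch", "num_pages", "seq_len", "seed"] : List String))) ks
    simpa using this
  · -- strictly increasing under the lex key
    rw [List.pairwise_append]
    refine ⟨?_, ?_, ?_⟩
    · exact List.Pairwise.sublist (List.filter_sublist) (by decide)
    · have hnd' : (PySem.List.sorted
          (ks.filter (fun k => decide (k ∉ (["batch", "num_pages", "seq_len", "seed"] : List String))))
          (fun k => k) false).Nodup :=
        h2.symm.nodup (List.Nodup.filter _ hnd)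
      have hle := PySem.List.sorted_pairwise
        (ks.filter (fun k => decide (k ∉ (["batch", "num_pages", "seq_len", "seed"] : List String))))
        (fun k => k)
      have hlt := (List.Pairwise.and hle hnd').imp
        (fun h => lt_of_le_of_ne h.1 h.2)
      refine List.Pairwise.imp_of_mem ?_ hlt
      intro a b ha hb hab
      rw [Prod.Lex.toLex_lt_toLex]
      exact Or.inr ⟨by rw [h4 a ha, h4 b hb], hab⟩
    · intro a ha b hb
      have hao : a ∈ (["batch", "num_pages", "seq_len", "seed"] : List String) :=
        (List.mem_filter.mp ha).1
      have hb4 : pvRankD b = 4 := h4 b hb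
      have ha4 : pvRankD a < 4 := by fin_cases hao <;> simp [pvRankD]
      rw [Prod.Lex.toLex_lt_toLex]
      exact Or.inl (by omega)

-- ===== VERDICT (by name: the statement is the Claim_ definition above) =====
theorem reorder_spec_py_spec : Claim_equal_reorder_spec_py := by
  intro spec _
  show reorder_spec_py spec = reorder_spec_py_alt spec
  simp only [reorder_spec_py, reorder_spec_py_alt]
  rw [pv_foldA, pv_foldB, pv_pairs_eq]
  set ps : List (String × String) :=
    (((PySem.Str.split? spec ";").getD []).filterMap
      (fun p => pvParse (PySem.Str.strip p))) with hps
  rw [show (((PySem.Str.split? spec ";").getD []).reverse).filterMap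
        (fun p => pvParse (PySem.Str.strip p)) = ps.reverse from
    by rw [hps, List.filterMap_reverse]]
  set kvA : PySem.Dict String String :=
    ps.foldl (fun d p => d.insert p.1 p.2) PySem.Dict.empty with hkvA
  set kvB : PySem.Dict String String :=
    ps.reverse.foldl (fun d p => d.setdefault p.1 p.2) PySem.Dict.empty with hkvB
  -- the two dicts agree on every lookup
  have hget : ∀ k, kvA.get? k = kvB.get? k := by
    intro k
    rw [hkvA, hkvB, pv_insert_fold_get?, pv_setdefault_fold_get?]
    simp [PySem.Dict.get?_empty]
  have hndA : kvA.keys.Nodup := pv_nodup_insert_fold ps _ List.nodup_nil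
  have hndB : kvB.keys.Nodup := pv_nodup_setdefault_fold ps.reverse _ List.nodup_nil
  have hmem : ∀ k, k ∈ kvA.keys ↔ k ∈ kvB.keys := by
    intro k
    rw [← PySem.Dict.contains_iff_mem_keys, ← PySem.Dict.contains_iff_mem_keys,
      PySem.Dict.contains_eq_isSome_get?, PySem.Dict.contains_eq_isSome_get?, hget]
  have hperm : kvA.keys.Perm kvB.keys :=
    (List.perm_ext_iff_of_nodup hndA hndB).mpr hmem
  have hgetD : ∀ k, kvA.getD k "" = kvB.getD k "" := by
    intro k
    rw [PySem.Dict.getD_eq_get?_getD, PySem.Dict.getD_eq_get?_getD, hget]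
  by_cases hemp : kvA.keys = []
  · have hB : kvB.keys = [] := by
      rw [hemp] at hperm; exact hperm.symm.eq_nil
    rw [if_pos hemp, if_pos hB]
  · have hempB : ¬ kvB.keys = [] := by
      intro h; rw [h] at hperm; exact hemp hperm.eq_nil
    rw [if_neg hemp, if_neg hempB]
    -- normalise B's rank key, then identify both emitted key sequences
    rw [show (fun k => if decide (k ∈ (["batch", "num_pages", "seq_len", "seed"] : List String))
          then (((PySem.List.index? (["batch", "num_pages", "seq_len", "seed"] : List String) k).getD 0 : Nat) : Int)
          else ((["batch", "num_pages", "seq_len", "seed"] : List String).length : Int))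
        = fun k => pvRankD k from funext pv_rankB_eq]
    rw [pv_sorted2_eq_sorted_lex,
      PySem.List.sorted_eq_sorted_of_perm _ _ _
        (fun a b hab => by
          have := congrArg ofLex hab
          simpa using congrArg Prod.snd this) hperm.symm,
      ← pv_sorted2_eq_sorted_lex, pv_sorted2_rank kvA.keys hndA]
    rw [show (["batch", "num_pages", "seq_len", "seed"] : List String).filter
          (fun o => decide (o ∈ kvA.keys))
        = (["batch", "num_pages", "seq_len", "seed"] : List String).filter
          (fun k => kvA.contains k) from
      (List.filter_congr (fun k _ => by
        rw [Bool.eq_iff_iff, decide_eq_true_eq]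
        exact (PySem.Dict.contains_iff_mem_keys kvA k).symm))]
    rw [PySem.List.foldl_append_singleton_eq_map, ← List.map_append]
    rw [show (fun k => k ++ ": " ++ kvA.getD k "") = (fun k => k ++ ": " ++ kvB.getD k "")
      from funext fun k => by rw [hgetD]]
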